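-- pv_equiv track=rewrite | github.com/ameforce/windows-supporter | src/apps/Notion.py | _convert_markdown_links_to_url_only
-- ===== SOURCE A (Python) =====
-- def _convert_markdown_links_to_url_only(text: str) -> str:
--     out = []
--     i = 0
--     n = len(text)
--     while i < n:
--         if text[i] == "[":
--             j = i + 1
--             depth = 1
--             while j < n and depth > 0:
--                 c = text[j]
--                 if c == "[":
--                     depth += 1
--                 elif c == "]":
--                     depth -= 1
--                 j += 1
--
--             if depth == 0 and j < n and text[j] == "(":
--                 k = j + 1
--                 while k < n and text[k] != ")":
--                     k += 1
--                 if k < n: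
--                     url = text[j + 1 : k].strip()
--                     if url:
--                         out.append(url)
--                         i = k + 1
--                         continue
--
--         out.append(text[i])
--         i += 1
--     return "".join(out)
-- ===== SOURCE B (Python) =====
-- def _convert_markdown_links_to_url_only(text: str) -> str:
--     n = len(text)
--     # one stack pass: match[p] = index of the ']' matching the '[' at p, else -1
--     match = [-1] * n
--     stack = []
--     for idx in range(n):
--         c = text[idx]
--         if c == "[":
--             stack.append(idx)
--         elif c == "]" and stack:
--             match[stack.pop()] = idx
--     # one reverse pass: nextclose[p] = first index >= p holding ')', else n
--     nextclose = [n] * (n + 1)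
--     nc = n
--     for idx in range(n - 1, -1, -1):
--         if text[idx] == ")":
--             nc = idx
--         nextclose[idx] = nc
--     out = []
--     i = 0
--     while i < n:
--         if text[i] == "[":
--             m = match[i]
--             if m != -1 and m + 1 < n and text[m + 1] == "(":
--                 k = nextclose[m + 2]
--                 if k < n:
--                     url = text[m + 2 : k].strip()
--                     if url:
--                         out.append(url)
--                         i = k + 1
--                         continue
--         out.append(text[i])
--         i += 1
--     return "".join(out)
-- ===== Notes on version B (the rewrite author's own statement) =====
-- stated objective: alternative
-- what changed: Replaces A's per-bracket rescans (a depth scan for each matching close-bracket and a forward scan for the next closing parenthesis) with two tables precomputed in single passes -- matching-bracket indices from one stack pass and a next-closing-parenthesis table from one reverse pass -- so the main loop does O(1) work per position; it trades two extra linear passes for the removal of A's worst-case quadratic rescanning.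
import Mathlib
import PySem

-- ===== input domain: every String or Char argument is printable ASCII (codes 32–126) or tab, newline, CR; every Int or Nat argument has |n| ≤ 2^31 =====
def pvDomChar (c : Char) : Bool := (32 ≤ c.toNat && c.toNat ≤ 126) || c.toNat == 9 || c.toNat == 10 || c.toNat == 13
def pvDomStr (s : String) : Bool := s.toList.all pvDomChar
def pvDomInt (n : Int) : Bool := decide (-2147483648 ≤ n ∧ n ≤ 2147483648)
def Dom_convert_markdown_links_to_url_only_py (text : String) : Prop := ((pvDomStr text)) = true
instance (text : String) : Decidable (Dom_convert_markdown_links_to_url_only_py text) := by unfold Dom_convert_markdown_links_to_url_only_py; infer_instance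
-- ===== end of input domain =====

-- B replaces A's per-bracket rescans with a stack-built matching-bracket table and a
-- reverse-pass next-closing-parenthesis table, so the main loop does O(1) work per position.


-- ===== PORT A =====
-- inner `while j < n and depth > 0` loop of A (depth scan for the matching ']')
def pvBscan (l : List Char) (n j : Nat) (depth : Int) : Nat × Int :=
  if _h : j < n ∧ 0 < depth then
    let c := l.getD j ' '
    pvBscan l n (j + 1) (if c = '[' then depth + 1 else if c = ']' then depth - 1 else depth)
  else (j, depth)
termination_by n - j

-- inner `while k < n and text[k] != ')'` loop of A
def pvKscan (l : List Char) (n k : Nat) : Nat :=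
  if _h : k < n ∧ l.getD k ' ' ≠ ')' then pvKscan l n (k + 1) else k
termination_by n - k

-- outer `while i < n` loop of A; out is built by appending in order (join of the pieces).
-- fuel = n - i bound (the Python loop terminates because i strictly increases each
-- iteration; fuel only makes that explicit, it never runs out when started at n).
def pvOutA (l : List Char) (n : Nat) (fuel i : Nat) : List Char :=
  match fuel with
  | 0 => []
  | fuel + 1 =>
    if i < n then
      if l.getD i ' ' = '[' then
        let p := pvBscan l n (i + 1) 1
        if p.2 = 0 ∧ p.1 < n ∧ l.getD p.1 ' ' = '(' then
          let k := pvKscan l n (p.1 + 1)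
          if k < n then
            -- text[j+1:k] with 0 ≤ j+1 ≤ k ≤ n is exactly drop/take
            let url := PySem.Chars.strip ((l.drop (p.1 + 1)).take (k - (p.1 + 1)))
            if url ≠ [] then url ++ pvOutA l n fuel (k + 1)
            else l.getD i ' ' :: pvOutA l n fuel (i + 1)
          else l.getD i ' ' :: pvOutA l n fuel (i + 1)
        else l.getD i ' ' :: pvOutA l n fuel (i + 1)
      else l.getD i ' ' :: pvOutA l n fuel (i + 1)
    else []

def convert_markdown_links_to_url_only_py (text : String) : String :=
  String.ofList (pvOutA text.toList text.toList.length text.toList.length 0)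

-- ===== PORT B =====
-- one step of B's `for idx in range(n)` stack pass (state = (stack, match table))
def pvMStep (l : List Char) (st : List Nat × List Int) (idx : Nat) : List Nat × List Int :=
  let c := l.getD idx ' '
  if c = '[' then (idx :: st.1, st.2)
  else if c = ']' then
    match st.1 with
    | [] => st
    | p :: rest => (rest, st.2.set p (idx : Int))
  else st

def pvMatchTbl (l : List Char) : List Int :=
  ((List.range l.length).foldl (pvMStep l) ([], List.replicate l.length (-1))).2

-- B's `for idx in range(n-1, -1, -1)` reverse pass; called with idx = n
def pvNCLoop (l : List Char) (idx nc : Nat) (tbl : List Nat) : List Nat :=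
  match idx with
  | 0 => tbl
  | idx' + 1 =>
    let nc' := if l.getD idx' ' ' = ')' then idx' else nc
    pvNCLoop l idx' nc' (tbl.set idx' nc')

def pvNCTbl (l : List Char) : List Nat :=
  pvNCLoop l l.length l.length (List.replicate (l.length + 1) l.length)

-- B's main `while i < n` loop; table lookups replace A's rescans. fuel = n - i bound
-- (the Python loop terminates because i strictly increases; fuel only makes that explicit).
def pvOutB (l : List Char) (n : Nat) (mt : List Int) (nc : List Nat) (fuel i : Nat) : List Char :=
  match fuel with
  | 0 => []
  | fuel + 1 =>
    if i < n then
      if l.getD i ' ' = '[' then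
        let m := mt.getD i (-1)
        if m ≠ -1 ∧ m + 1 < (n : Int) ∧ l.getD (m.toNat + 1) ' ' = '(' then
          let k := nc.getD (m.toNat + 2) n
          if k < n then
            let url := PySem.Chars.strip ((l.drop (m.toNat + 2)).take (k - (m.toNat + 2)))
            if url ≠ [] then url ++ pvOutB l n mt nc fuel (k + 1)
            else l.getD i ' ' :: pvOutB l n mt nc fuel (i + 1)
          else l.getD i ' ' :: pvOutB l n mt nc fuel (i + 1)
        else l.getD i ' ' :: pvOutB l n mt nc fuel (i + 1)
      else l.getD i ' ' :: pvOutB l n mt nc fuel (i + 1)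
    else []

def convert_markdown_links_to_url_only_py_alt (text : String) : String :=
  let l := text.toList
  let n := l.length
  String.ofList (pvOutB l n (pvMatchTbl l) (pvNCTbl l) n 0)

-- ===== PRECONDITION & SPEC =====
def Spec_convert_markdown_links_to_url_only_py (text : String) (out : String) : Prop := out = convert_markdown_links_to_url_only_py_alt text
instance (text : String) (out : String) : Decidable (Spec_convert_markdown_links_to_url_only_py text out) := by unfold Spec_convert_markdown_links_to_url_only_py; infer_instance

-- ===== CLAIM (what is proved, stated in full; the proofs are below) =====
def Claim_equal_convert_markdown_links_to_url_only_py : Prop := ∀ (text : String), Dom_convert_markdown_links_to_url_only_py text → Spec_convert_markdown_links_to_url_only_py text (convert_markdown_links_to_url_only_py text)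

-- ===== LEMMAS AND PROOFS =====

theorem pvBscan_ge (l : List Char) (n j : Nat) (d : Int) : j ≤ (pvBscan l n j d).1 := by
  have H : ∀ fuel j d, n - j ≤ fuel → j ≤ (pvBscan l n j d).1 := by
    intro fuel
    induction fuel with
    | zero => intro j d h; rw [pvBscan]; split
              · omega
              · simp
    | succ fuel ih =>
        intro j d h; rw [pvBscan]; split
        · exact le_trans (by omega) (ih (j + 1) _ (by omega))
        · simp
  exact H (n - j) j d le_rfl

theorem pvKscan_ge (l : List Char) (n k : Nat) : k ≤ pvKscan l n k := by
  have H : ∀ fuel k, n - k ≤ fuel → k ≤ pvKscan l n k := by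
    intro fuel
    induction fuel with
    | zero => intro k h; rw [pvKscan]; split
              · omega
              · omega
    | succ fuel ih =>
        intro k h; rw [pvKscan]; split
        · exact le_trans (by omega) (ih (k + 1) (by omega))
        · omega
  exact H (n - k) k le_rfl


-- depth change contributed by one character
def pvChg (c : Char) : Int := if c = '[' then 1 else if c = ']' then -1 else 0

-- depth of A's bracket scan started at s (with depth 1) after reading up to position t
def pvG (l : List Char) (s t : Nat) : Int := 1 + (((l.take t).drop s).map pvChg).sum

theorem pvG_self (l : List Char) (s : Nat) : pvG l s s = 1 := by
  have : (l.take s).drop s = [] := List.drop_eq_nil_of_le (by simp)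
  simp [pvG, this]

theorem pvG_succ (l : List Char) (s t : Nat) (h1 : s ≤ t) (h2 : t < l.length) :
    pvG l s (t + 1) = pvG l s t + pvChg (l.getD t ' ') := by
  have htake : l.take (t + 1) = l.take t ++ [l[t]] := by
    rw [List.take_succ]
    simp [h2]
  have hdrop : (l.take t ++ [l[t]]).drop s = (l.take t).drop s ++ [l[t]] := by
    rw [List.drop_append_of_le_length]
    simp [h1, Nat.min_eq_left (le_of_lt h2), h2.le]
  have hgetD : l.getD t ' ' = l[t] := by
    simp [List.getD_eq_getElem?_getD, h2]
  rw [pvG, htake, hdrop, hgetD]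
  simp [pvG]
  ring

theorem pvBscan_step (l : List Char) (n j : Nat) (d : Int) (h : j < n) (hd : 0 < d) :
    pvBscan l n j d = pvBscan l n (j + 1) (d + pvChg (l.getD j ' ')) := by
  rw [pvBscan, dif_pos ⟨h, hd⟩]
  show pvBscan l n (j + 1) (if l.getD j ' ' = '[' then d + 1 else if l.getD j ' ' = ']' then d - 1 else d) = _
  have hbody : (if l.getD j ' ' = '[' then d + 1 else if l.getD j ' ' = ']' then d - 1 else d)
      = d + pvChg (l.getD j ' ') := by
    simp only [pvChg]
    split_ifs <;> ring
  rw [hbody]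

theorem pvBscan_stop (l : List Char) (n j : Nat) (d : Int) (h : ¬(j < n ∧ 0 < d)) :
    pvBscan l n j d = (j, d) := by
  rw [pvBscan, dif_neg h]

theorem pvBscan_run (l : List Char) (n s : Nat) (hn : n = l.length) :
    ∀ t, s ≤ t → t ≤ n → (∀ u, s ≤ u → u < t → 0 < pvG l s u) →
    pvBscan l n s 1 = pvBscan l n t (pvG l s t) := by
  intro t
  induction t with
  | zero => intro h0 _ _; have : s = 0 := Nat.le_zero.mp h0; rw [this, pvG_self]
  | succ t ih =>
    intro hst htn hrun
    rcases Nat.lt_or_ge s (t + 1) with hlt | hge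
    · have hst' : s ≤ t := by omega
      have ih' := ih hst' (by omega) (fun u hu hut => hrun u hu (by omega))
      rw [ih', pvBscan_step l n t _ (by omega) (hrun t hst' (by omega)),
          pvG_succ l s t hst' (by omega)]
    · have hs1 : s = t + 1 := by omega
      subst hs1
      rw [pvG_self]

theorem pvBscan_found (l : List Char) (n s m : Nat) (hn : n = l.length)
    (hm : s ≤ m) (hmn : m < n) (h0 : pvG l s (m + 1) = 0)
    (hrun : ∀ u, s ≤ u → u ≤ m → 0 < pvG l s u) :
    pvBscan l n s 1 = (m + 1, 0) := by
  rw [pvBscan_run l n s hn (m + 1) (by omega) (by omega)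
        (fun u hu hut => hrun u hu (by omega)), h0,
      pvBscan_stop l n (m + 1) 0 (by omega)]

theorem pvBscan_none (l : List Char) (n s : Nat) (hn : n = l.length) (hs : s ≤ n)
    (hrun : ∀ u, s ≤ u → u ≤ n → 0 < pvG l s u) :
    pvBscan l n s 1 = (n, pvG l s n) ∧ 0 < pvG l s n := by
  refine ⟨?_, hrun n hs le_rfl⟩
  rw [pvBscan_run l n s hn n hs le_rfl (fun u hu hut => hrun u hu (by omega)),
      pvBscan_stop l n n _ (by omega)]

theorem pvNCLoop_spec (l : List Char) :
    ∀ idx nc tbl, idx ≤ l.length → tbl.length = l.length + 1 →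
    nc = pvKscan l l.length idx →
    (∀ q, idx ≤ q → q ≤ l.length → tbl.getD q l.length = pvKscan l l.length q) →
    ∀ q, q ≤ l.length → (pvNCLoop l idx nc tbl).getD q l.length = pvKscan l l.length q := by
  intro idx
  induction idx with
  | zero => intro nc tbl _ _ _ htbl q hq; exact htbl q (Nat.zero_le q) hq
  | succ idx ih =>
    intro nc tbl hidx hlen hnc htbl q hq
    simp only [pvNCLoop]
    have hidxn : idx < l.length := hidx
    have hnc' : (if l.getD idx ' ' = ')' then idx else nc) = pvKscan l l.length idx := by
      rw [pvKscan]
      by_cases hc : l.getD idx ' ' = ')'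
      · rw [if_pos hc, dif_neg (fun h => h.2 hc)]
      · rw [if_neg hc, dif_pos ⟨hidxn, hc⟩, hnc]
    refine ih _ _ (by omega) (by simp [hlen]) hnc' ?_ q hq
    intro q' hq1 hq2
    rcases Nat.eq_or_lt_of_le hq1 with heq | hlt
    · subst heq
      rw [List.getD_eq_getElem?_getD, List.getElem?_set_self (by omega), Option.getD_some, hnc']
    · rw [List.getD_eq_getElem?_getD, List.getElem?_set_ne (by omega), ← List.getD_eq_getElem?_getD]
      exact htbl q' (by omega) hq2

theorem pvNCTbl_spec (l : List Char) (q : Nat) (hq : q ≤ l.length) :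
    (pvNCTbl l).getD q l.length = pvKscan l l.length q := by
  refine pvNCLoop_spec l l.length l.length _ le_rfl (by simp) ?_ ?_ q hq
  · rw [pvKscan, dif_neg (by omega)]
  · intro q' h1 h2
    have : q' = l.length := le_antisymm h2 h1
    subst this
    rw [List.getD_eq_getElem?_getD, List.getElem?_replicate_of_lt (by omega), Option.getD_some,
        pvKscan, dif_neg (by omega)]

def pvMState (l : List Char) (t : Nat) : List Nat × List Int :=
  (List.range t).foldl (pvMStep l) ([], List.replicate l.length (-1))

theorem pvMState_succ (l : List Char) (t : Nat) :
    pvMState l (t + 1) = pvMStep l (pvMState l t) t := by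
  simp [pvMState, List.range_succ]

theorem pvMStep_open (l : List Char) (st : List Nat × List Int) (idx : Nat)
    (h : l.getD idx ' ' = '[') : pvMStep l st idx = (idx :: st.1, st.2) := by
  rw [List.getD_eq_getElem?_getD] at h
  simp [pvMStep, h]

theorem pvMStep_close_nil (l : List Char) (st : List Nat × List Int) (idx : Nat)
    (h : l.getD idx ' ' = ']') (h2 : st.1 = []) : pvMStep l st idx = st := by
  rw [List.getD_eq_getElem?_getD] at h
  simp [pvMStep, h, h2]

theorem pvMStep_close_cons (l : List Char) (st : List Nat × List Int) (idx q : Nat)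
    (rest : List Nat) (h : l.getD idx ' ' = ']') (h2 : st.1 = q :: rest) :
    pvMStep l st idx = (rest, st.2.set q (idx : Int)) := by
  rw [List.getD_eq_getElem?_getD] at h
  simp [pvMStep, h, h2]

theorem pvMStep_other (l : List Char) (st : List Nat × List Int) (idx : Nat)
    (h1 : l.getD idx ' ' ≠ '[') (h2 : l.getD idx ' ' ≠ ']') : pvMStep l st idx = st := by
  rw [List.getD_eq_getElem?_getD] at h1 h2
  simp [pvMStep, h1, h2]

theorem pvMInv (l : List Char) : ∀ t, t ≤ l.length →
    (pvMState l t).2.length = l.length ∧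
    (∀ (r p : Nat), ((pvMState l t).1)[r]? = some p →
        p < t ∧ l.getD p ' ' = '[' ∧ pvG l (p + 1) t = (r : Int) + 1 ∧
        (∀ u, p < u → u ≤ t → 0 < pvG l (p + 1) u)) ∧
    (∀ p, p < l.length → p ∉ (pvMState l t).1 → l.getD p ' ' = '[' → p < t →
        ∃ m : Nat, ((pvMState l t).2)[p]? = some (m : Int) ∧ p < m ∧ m < t ∧
          pvG l (p + 1) (m + 1) = 0 ∧ (∀ u, p < u → u ≤ m → 0 < pvG l (p + 1) u)) ∧
    (∀ p, p < l.length → (p ∈ (pvMState l t).1 ∨ l.getD p ' ' ≠ '[' ∨ t ≤ p) →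
        ((pvMState l t).2)[p]? = some (-1)) := by
  intro t
  induction t with
  | zero =>
    intro _
    refine ⟨by simp [pvMState], ?_, ?_, ?_⟩
    · intro r p hr; simp [pvMState] at hr
    · intro p _ _ _ hp; omega
    · intro p hp _
      simp only [pvMState, List.range_zero, List.foldl_nil]
      simp [List.getElem?_replicate, hp]
  | succ t ih =>
    intro ht1
    have ht : t ≤ l.length := by omega
    have htlen : t < l.length := by omega
    obtain ⟨h1, h2, h3, h4⟩ := ih ht
    rw [pvMState_succ]
    by_cases hbr : l.getD t ' ' = '['
    · have hchg : pvChg (l.getD t ' ') = 1 := by rw [pvChg, if_pos hbr]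
      rw [pvMStep_open l _ t hbr]
      refine ⟨h1, ?_, ?_, ?_⟩
      · intro r p hr
        cases r with
        | zero =>
          simp only [List.getElem?_cons_zero, Option.some.injEq] at hr
          subst hr
          refine ⟨by omega, hbr, by rw [pvG_self]; norm_num, ?_⟩
          intro u hu1 hu2
          have : u = t + 1 := by omega
          subst this
          rw [pvG_self]; omega
        | succ r =>
          rw [List.getElem?_cons_succ] at hr
          obtain ⟨hp1, hp2, hp3, hp4⟩ := h2 r p hr
          refine ⟨by omega, hp2, ?_, ?_⟩
          · rw [pvG_succ l (p + 1) t (by omega) htlen, hchg, hp3]; push_cast; ring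
          · intro u hu1 hu2
            by_cases hu : u ≤ t
            · exact hp4 u hu1 hu
            · have : u = t + 1 := by omega
              subst this
              rw [pvG_succ l (p + 1) t (by omega) htlen, hchg, hp3]; omega
      · intro p hp hmem hpbr hpt
        have hmem' : p ≠ t ∧ p ∉ (pvMState l t).1 := by
          rw [List.mem_cons] at hmem; push_neg at hmem; exact hmem
        have hplt : p < t := by omega
        obtain ⟨m, hm1, hm2, hm3, hm4, hm5⟩ := h3 p hp hmem'.2 hpbr hplt
        exact ⟨m, hm1, hm2, by omega, hm4, hm5⟩
      · intro p hp hcond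
        apply h4 p hp
        rcases hcond with hmem | hne | hge
        · rcases List.mem_cons.mp hmem with he | hmem2
          · right; right; omega
          · left; exact hmem2
        · right; left; exact hne
        · right; right; omega
    · by_cases hcl : l.getD t ' ' = ']'
      · have hchg : pvChg (l.getD t ' ') = -1 := by rw [pvChg, if_neg hbr, if_pos hcl]
        rcases hstk : (pvMState l t).1 with _ | ⟨q, rest⟩
        · rw [pvMStep_close_nil l _ t hcl hstk]
          refine ⟨h1, ?_, ?_, ?_⟩
          · intro r p hr; rw [hstk] at hr; simp at hr
          · intro p hp hmem hpbr hpt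
            have hpt' : p ≠ t := fun he => by rw [he, hcl] at hpbr; exact absurd hpbr (by decide)
            obtain ⟨m, hm1, hm2, hm3, hm4, hm5⟩ :=
              h3 p hp (by rw [hstk]; simp) hpbr (by omega)
            exact ⟨m, hm1, hm2, by omega, hm4, hm5⟩
          · intro p hp hcond
            apply h4 p hp
            rcases hcond with hmem | hne | hge
            · rw [hstk] at hmem; simp at hmem
            · right; left; exact hne
            · right; right; omega
        · obtain ⟨hq1, hq2, hq3, hq4⟩ := h2 0 q (by rw [hstk]; rfl)
          have hq3' : pvG l (q + 1) t = 1 := by rw [hq3]; norm_num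
          have hqlen : q < (pvMState l t).2.length := by rw [h1]; omega
          rw [pvMStep_close_cons l _ t q rest hcl hstk]
          refine ⟨by simpa using h1, ?_, ?_, ?_⟩
          · intro r p hr
            have hr' : (pvMState l t).1[r + 1]? = some p := by
              rw [hstk, List.getElem?_cons_succ]; exact hr
            obtain ⟨hp1, hp2, hp3, hp4⟩ := h2 (r + 1) p hr'
            refine ⟨by omega, hp2, ?_, ?_⟩
            · rw [pvG_succ l (p + 1) t (by omega) htlen, hchg, hp3]; push_cast; ring
            · intro u hu1 hu2
              by_cases hu : u ≤ t
              · exact hp4 u hu1 hu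
              · have : u = t + 1 := by omega
                subst this
                rw [pvG_succ l (p + 1) t (by omega) htlen, hchg, hp3]; omega
          · intro p hp hmem hpbr hpt
            by_cases hpq : p = q
            · subst hpq
              refine ⟨t, ?_, by omega, by omega, ?_, ?_⟩
              · rw [List.getElem?_set_self hqlen]
              · rw [pvG_succ l (p + 1) t (by omega) htlen, hchg, hq3']; norm_num
              · exact hq4
            · have hmem2 : p ∉ (pvMState l t).1 := by
                rw [hstk, List.mem_cons]; push_neg; exact ⟨hpq, hmem⟩
              have hpt' : p ≠ t := fun he => by rw [he, hcl] at hpbr; exact absurd hpbr (by decide)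
              obtain ⟨m, hm1, hm2, hm3, hm4, hm5⟩ := h3 p hp hmem2 hpbr (by omega)
              refine ⟨m, ?_, hm2, by omega, hm4, hm5⟩
              rw [List.getElem?_set_ne (fun h => hpq h.symm)]
              exact hm1
          · intro p hp hcond
            have hpq : p ≠ q := by
              rcases hcond with hmem | hne | hge
              · intro he
                subst he
                obtain ⟨r, hr⟩ := List.getElem?_of_mem hmem
                have hr' : (pvMState l t).1[r + 1]? = some p := by
                  rw [hstk, List.getElem?_cons_succ]; exact hr
                have h22 := (h2 (r + 1) p hr').2.2.1
                have := hq3'.symm.trans h22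
                omega
              · intro he; subst he; exact hne hq2
              · intro he; subst he; omega
            rw [List.getElem?_set_ne (fun h => hpq h.symm)]
            apply h4 p hp
            rcases hcond with hmem | hne | hge
            · left; rw [hstk]; exact List.mem_cons_of_mem _ hmem
            · right; left; exact hne
            · right; right; omega
      · have hchg : pvChg (l.getD t ' ') = 0 := by rw [pvChg, if_neg hbr, if_neg hcl]
        rw [pvMStep_other l _ t hbr hcl]
        refine ⟨h1, ?_, ?_, ?_⟩
        · intro r p hr
          obtain ⟨hp1, hp2, hp3, hp4⟩ := h2 r p hr
          refine ⟨by omega, hp2, ?_, ?_⟩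
          · rw [pvG_succ l (p + 1) t (by omega) htlen, hchg, hp3]; ring
          · intro u hu1 hu2
            by_cases hu : u ≤ t
            · exact hp4 u hu1 hu
            · have : u = t + 1 := by omega
              subst this
              rw [pvG_succ l (p + 1) t (by omega) htlen, hchg, hp3]; omega
        · intro p hp hmem hpbr hpt
          have hpt' : p ≠ t := fun he => by rw [he] at hpbr; exact hbr hpbr
          obtain ⟨m, hm1, hm2, hm3, hm4, hm5⟩ := h3 p hp hmem hpbr (by omega)
          exact ⟨m, hm1, hm2, by omega, hm4, hm5⟩
        · intro p hp hcond
          apply h4 p hp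
          rcases hcond with hmem | hne | hge
          · left; exact hmem
          · right; left; exact hne
          · right; right; omega

theorem pvMatch_spec (l : List Char) (p : Nat) (hp : p < l.length) (hc : l.getD p ' ' = '[') :
    ((pvMatchTbl l).getD p (-1) = -1 ∧ (pvBscan l l.length (p + 1) 1).2 ≠ 0) ∨
    (∃ m : Nat, (pvMatchTbl l).getD p (-1) = (m : Int) ∧ p < m ∧ m < l.length ∧
        pvBscan l l.length (p + 1) 1 = (m + 1, 0)) := by
  obtain ⟨h1, h2, h3, h4⟩ := pvMInv l l.length le_rfl
  have htbl : pvMatchTbl l = (pvMState l l.length).2 := rfl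
  by_cases hmem : p ∈ (pvMState l l.length).1
  · left
    obtain ⟨r, hr⟩ := List.getElem?_of_mem hmem
    obtain ⟨_, _, hg, hrun⟩ := h2 r p hr
    obtain ⟨hbs, hpos⟩ := pvBscan_none l l.length (p + 1) rfl (by omega)
        (fun u hu1 hu2 => hrun u (by omega) hu2)
    refine ⟨?_, ?_⟩
    · rw [htbl, List.getD_eq_getElem?_getD, h4 p hp (Or.inl hmem)]; rfl
    · rw [hbs]; simpa using (by omega : pvG l (p + 1) l.length ≠ 0)
  · right
    obtain ⟨m, hm1, hm2, hm3, hm4, hm5⟩ := h3 p hp hmem hc hp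
    refine ⟨m, ?_, hm2, hm3, ?_⟩
    · rw [htbl, List.getD_eq_getElem?_getD, hm1]; rfl
    · exact pvBscan_found l l.length (p + 1) m rfl (by omega) hm3 hm4
        (fun u hu1 hu2 => hm5 u (by omega) hu2)

theorem pvOut_eq (l : List Char) : ∀ fuel i, l.length - i ≤ fuel →
    pvOutA l l.length fuel i = pvOutB l l.length (pvMatchTbl l) (pvNCTbl l) fuel i := by
  intro fuel
  induction fuel with
  | zero => intro i h; simp only [pvOutA, pvOutB]
  | succ fuel ih =>
    intro i h
    simp only [pvOutA, pvOutB]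
    by_cases hi : i < l.length
    · rw [if_pos hi, if_pos hi]
      by_cases hbr : l.getD i ' ' = '['
      · rw [if_pos hbr, if_pos hbr]
        rcases pvMatch_spec l i hi hbr with ⟨hm, hd⟩ | ⟨m, hm, hpm, hmn, hbs⟩
        · rw [if_neg (fun hco => hd hco.1), if_neg (fun hco => hco.1 hm)]
          rw [ih (i + 1) (by omega)]
        · have hge : i + 1 ≤ m + 1 := by
            have := pvBscan_ge l l.length (i + 1) 1
            rw [hbs] at this
            exact this
          simp only [hbs, hm, Int.toNat_natCast]
          have h2eq : m + 1 + 1 = m + 2 := rfl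
          rw [h2eq]
          by_cases hcond : m + 1 < l.length ∧ l.getD (m + 1) ' ' = '('
          · rw [pvNCTbl_spec l (m + 2) (by omega)]
            rw [if_pos ⟨trivial, hcond.1, hcond.2⟩,
                if_pos (show (m : Int) ≠ -1 ∧ (m : Int) + 1 < (l.length : Int) ∧
                    l.getD (m + 1) ' ' = '(' from
                  ⟨by omega, by exact_mod_cast hcond.1, hcond.2⟩)]
            by_cases hk : pvKscan l l.length (m + 2) < l.length
            · rw [if_pos hk, if_pos hk]
              have hkge := pvKscan_ge l l.length (m + 2)
              by_cases hurl : PySem.Chars.strip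
                  ((l.drop (m + 2)).take (pvKscan l l.length (m + 2) - (m + 2))) ≠ []
              · rw [if_pos hurl, if_pos hurl, ih (pvKscan l l.length (m + 2) + 1) (by omega)]
              · rw [if_neg hurl, if_neg hurl, ih (i + 1) (by omega)]
            · rw [if_neg hk, if_neg hk, ih (i + 1) (by omega)]
          · rw [if_neg (fun hco => hcond ⟨hco.2.1, hco.2.2⟩),
                if_neg (fun hco => hcond ⟨by exact_mod_cast hco.2.1, hco.2.2⟩),
                ih (i + 1) (by omega)]
      · rw [if_neg hbr, if_neg hbr, ih (i + 1) (by omega)]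
    · rw [if_neg hi, if_neg hi]

-- ===== VERDICT (by name: the statement is the Claim_ definition above) =====
theorem convert_markdown_links_to_url_only_py_spec : Claim_equal_convert_markdown_links_to_url_only_py := by
  intro text _
  unfold Spec_convert_markdown_links_to_url_only_py
  unfold convert_markdown_links_to_url_only_py convert_markdown_links_to_url_only_py_alt
  exact congrArg String.ofList
    (pvOut_eq text.toList text.toList.length 0 (by omega))
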